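-- pv_equiv track=rewrite | github.com/anjizhao/advent-of-code-2020 | day20/tiles2.py | apply_transformation_to_edge_tuple
-- ===== SOURCE A (Python) =====
-- FLIP_V = {
--     'top': 'bottom',
--     'bottom': 'top',
-- }
--
-- ROT_90 = {
--     'left': 'bottom',
--     'bottom': 'right',
--     'right': 'top',
--     'top': 'left',
-- }
--
-- def apply_transformation_to_edge_tuple(edge_tuple, t_dict):
--     tile_id, face = edge_tuple
--     rev = False
--     if t_dict['flip_v']:
--         face = FLIP_V.get(face, face)
--         rev = rev ^ True
--     for i in range(t_dict['rot_90']):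
--         face = ROT_90.get(face, face)
--     return (tile_id, face, rev)
-- ===== SOURCE B (Python) =====
-- # B: closed-form modular rotation on the 4-cycle instead of iterating the ROT_90 dict.
-- ROTATION_CYCLE = ['top', 'left', 'bottom', 'right']
-- FLIP_V = {'top': 'bottom', 'bottom': 'top'}
--
-- def apply_transformation_to_edge_tuple(edge_tuple, t_dict):
--     tile_id, face = edge_tuple
--     rev = bool(t_dict['flip_v'])
--     if rev:
--         face = FLIP_V.get(face, face)
--     if face in ROTATION_CYCLE:
--         i = ROTATION_CYCLE.index(face)
--         face = ROTATION_CYCLE[(i + t_dict['rot_90']) % 4]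
--     return (tile_id, face, rev)
-- ===== Notes on version B (the rewrite author's own statement) =====
-- stated objective: simpler
-- what changed: Replaces the rot_90-iteration loop over the ROT_90 successor dict with a closed-form modular index computation on the 4-cycle ['top','left','bottom','right'].
-- intended difference: On inputs with a negative rot_90 not divisible by 4 and a face on the rotation cycle, A's empty range() loop leaves the face unrotated while B rotates by rot_90 mod 4, the intended meaning of a (possibly negative) quarter-turn count. — e.g. on apply_transformation_to_edge_tuple((1, "top"), [("flip_v", 0), ("rot_90", -1)]): A returns (1, "top", false), B returns (1, "right", false)
import Mathlib
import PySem

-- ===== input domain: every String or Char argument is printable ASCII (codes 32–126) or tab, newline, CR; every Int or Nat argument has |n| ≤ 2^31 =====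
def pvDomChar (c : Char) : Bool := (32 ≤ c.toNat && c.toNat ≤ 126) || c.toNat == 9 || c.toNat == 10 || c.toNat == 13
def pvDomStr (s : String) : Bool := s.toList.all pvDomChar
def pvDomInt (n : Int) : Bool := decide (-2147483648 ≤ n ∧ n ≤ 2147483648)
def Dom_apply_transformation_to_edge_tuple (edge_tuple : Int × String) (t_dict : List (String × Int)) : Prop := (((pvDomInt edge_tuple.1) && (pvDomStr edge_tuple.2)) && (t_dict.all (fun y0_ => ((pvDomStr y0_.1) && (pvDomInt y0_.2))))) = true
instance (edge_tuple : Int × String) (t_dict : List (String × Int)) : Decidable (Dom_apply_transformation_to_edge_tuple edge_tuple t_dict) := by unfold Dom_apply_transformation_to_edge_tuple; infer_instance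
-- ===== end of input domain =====

-- B replaces A's rot_90-iteration loop over the ROT_90 dict by a closed-form modular
-- rotation on the 4-cycle (simpler); they differ only on negative rot_90 (see D_ below).

-- ===== PORT A =====
def pvFLIP_V : PySem.Dict String String := PySem.Dict.mk [("top", "bottom"), ("bottom", "top")]
def pvROT_90 : PySem.Dict String String :=
  PySem.Dict.mk [("left", "bottom"), ("bottom", "right"), ("right", "top"), ("top", "left")]

-- the 'for i in range(t_dict['rot_90'])' loop: apply ROT_90.get(face, face) n times
def pvRotLoop : Nat → String → String
  | 0, f => f
  | n + 1, f => pvRotLoop n (PySem.Dict.getD pvROT_90 f f)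

def apply_transformation_to_edge_tuple (edge_tuple : Int × String) (t_dict : List (String × Int)) : Int × String × Bool :=
  let tile_id := edge_tuple.1
  let face := edge_tuple.2
  -- t_dict['flip_v'] / t_dict['rot_90']: KeyError when absent (excluded by Pre_); .getD 0 is unreachable under Pre_
  let flip_v := ((PySem.Dict.mk t_dict).get? "flip_v").getD 0
  let rot_90 := ((PySem.Dict.mk t_dict).get? "rot_90").getD 0
  let (face, rev) :=
    if flip_v ≠ 0 then (PySem.Dict.getD pvFLIP_V face face, true) else (face, false)
  (tile_id, pvRotLoop rot_90.toNat face, rev)  -- range(n) is empty for n ≤ 0, hence .toNat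

-- ===== PORT B =====
def pvCycle : List String := ["top", "left", "bottom", "right"]

def apply_transformation_to_edge_tuple_alt (edge_tuple : Int × String) (t_dict : List (String × Int)) : Int × String × Bool :=
  let tile_id := edge_tuple.1
  let face := edge_tuple.2
  let rev := ((PySem.Dict.mk t_dict).get? "flip_v").getD 0 ≠ 0
  let face := if rev then PySem.Dict.getD pvFLIP_V face face else face
  let rot := ((PySem.Dict.mk t_dict).get? "rot_90").getD 0
  let face :=
    if face ∈ pvCycle then
      pvCycle.getD (PySem.Int.mod ((pvCycle.idxOf face : Int) + rot) 4).toNat ""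
    else face
  (tile_id, face, decide rev)

-- ===== PRECONDITION & SPEC =====
-- Pre_: both keys A subscripts must be present; otherwise Python A (and B) raise KeyError.
def Pre_apply_transformation_to_edge_tuple (edge_tuple : Int × String) (t_dict : List (String × Int)) : Prop :=
  ((PySem.Dict.mk t_dict).get? "flip_v").isSome ∧ ((PySem.Dict.mk t_dict).get? "rot_90").isSome
instance (edge_tuple : Int × String) (t_dict : List (String × Int)) : Decidable (Pre_apply_transformation_to_edge_tuple edge_tuple t_dict) := by unfold Pre_apply_transformation_to_edge_tuple; infer_instance

def pvWitness_apply_transformation_to_edge_tuple : (Int × String) × (List (String × Int)) :=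
  ((7, "top"), [("flip_v", 1), ("rot_90", 3)])

-- On inputs with a negative rot_90 not divisible by 4 and a face on the rotation cycle,
-- A's empty range() loop leaves the face unrotated while B rotates by rot_90 mod 4,
-- the intended meaning of a (possibly negative) quarter-turn count.
def D_apply_transformation_to_edge_tuple (edge_tuple : Int × String) (t_dict : List (String × Int)) : Prop :=
  ((PySem.Dict.mk t_dict).get? "rot_90").getD 0 < 0 ∧
  PySem.Int.mod (((PySem.Dict.mk t_dict).get? "rot_90").getD 0) 4 ≠ 0 ∧
  (edge_tuple.2 = "top" ∨ edge_tuple.2 = "left" ∨ edge_tuple.2 = "bottom" ∨ edge_tuple.2 = "right")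
instance (edge_tuple : Int × String) (t_dict : List (String × Int)) : Decidable (D_apply_transformation_to_edge_tuple edge_tuple t_dict) := by unfold D_apply_transformation_to_edge_tuple; infer_instance

def Spec_apply_transformation_to_edge_tuple (edge_tuple : Int × String) (t_dict : List (String × Int)) (out : Int × String × Bool) : Prop := ¬ D_apply_transformation_to_edge_tuple edge_tuple t_dict → out = apply_transformation_to_edge_tuple_alt edge_tuple t_dict
instance (edge_tuple : Int × String) (t_dict : List (String × Int)) (out : Int × String × Bool) : Decidable (Spec_apply_transformation_to_edge_tuple edge_tuple t_dict out) := by unfold Spec_apply_transformation_to_edge_tuple; infer_instance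

def pvDiffWitness_apply_transformation_to_edge_tuple : (Int × String) × (List (String × Int)) :=
  ((1, "top"), [("flip_v", 0), ("rot_90", -1)])
def pvDiffWitnessOut_apply_transformation_to_edge_tuple : (Int × String × Bool) × (Int × String × Bool) :=
  ((1, "top", false), (1, "right", false))

-- ===== CLAIM (what is proved, stated in full; the proofs are below) =====
def Claim_unchanged_apply_transformation_to_edge_tuple : Prop := ∀ (edge_tuple : Int × String) (t_dict : List (String × Int)), Dom_apply_transformation_to_edge_tuple edge_tuple t_dict → Pre_apply_transformation_to_edge_tuple edge_tuple t_dict → Spec_apply_transformation_to_edge_tuple edge_tuple t_dict (apply_transformation_to_edge_tuple edge_tuple t_dict)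
def Claim_changed_apply_transformation_to_edge_tuple : Prop := Dom_apply_transformation_to_edge_tuple (pvDiffWitness_apply_transformation_to_edge_tuple.1) (pvDiffWitness_apply_transformation_to_edge_tuple.2) ∧ Pre_apply_transformation_to_edge_tuple (pvDiffWitness_apply_transformation_to_edge_tuple.1) (pvDiffWitness_apply_transformation_to_edge_tuple.2) ∧ D_apply_transformation_to_edge_tuple (pvDiffWitness_apply_transformation_to_edge_tuple.1) (pvDiffWitness_apply_transformation_to_edge_tuple.2) ∧ apply_transformation_to_edge_tuple (pvDiffWitness_apply_transformation_to_edge_tuple.1) (pvDiffWitness_apply_transformation_to_edge_tuple.2) = pvDiffWitnessOut_apply_transformation_to_edge_tuple.1 ∧ apply_transformation_to_edge_tuple_alt (pvDiffWitness_apply_transformation_to_edge_tuple.1) (pvDiffWitness_apply_transformation_to_edge_tuple.2) = pvDiffWitnessOut_apply_transformation_to_edge_tuple.2 ∧ pvDiffWitnessOut_apply_transformation_to_edge_tuple.1 ≠ pvDiffWitnessOut_apply_transformation_to_edge_tuple.2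
def Claim_exact_apply_transformation_to_edge_tuple : Prop := ∀ (edge_tuple : Int × String) (t_dict : List (String × Int)), Dom_apply_transformation_to_edge_tuple edge_tuple t_dict → Pre_apply_transformation_to_edge_tuple edge_tuple t_dict → D_apply_transformation_to_edge_tuple edge_tuple t_dict → apply_transformation_to_edge_tuple edge_tuple t_dict ≠ apply_transformation_to_edge_tuple_alt edge_tuple t_dict

-- ===== LEMMAS AND PROOFS =====

-- a face outside the cycle is a fixed point of the loop step
lemma rot_step_fixed (f : String) (h : f ∉ pvCycle) :
    PySem.Dict.getD pvROT_90 f f = f := by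
  simp [pvCycle] at h
  obtain ⟨h1, h2, h3, h4⟩ := h
  simp [pvROT_90, PySem.Dict.getD_eq_get?_getD, beq_iff_eq, Ne.symm h1, Ne.symm h2, Ne.symm h3, Ne.symm h4, PySem.Dict.get?]

lemma rotLoop_fixed (n : Nat) (f : String) (h : f ∉ pvCycle) :
    pvRotLoop n f = f := by
  induction n with
  | zero => rfl
  | succ n ih => simp [pvRotLoop, rot_step_fixed f h, ih]

lemma rotLoop_cycle (n : Nat) (f : String) (h : f ∈ pvCycle) :
    pvRotLoop n f = pvCycle.getD ((pvCycle.idxOf f + n) % 4) "" := by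
  induction n generalizing f with
  | zero =>
    simp [pvCycle] at h
    rcases h with rfl | rfl | rfl | rfl <;> simp [pvRotLoop, pvCycle]
  | succ n ih =>
    simp [pvCycle] at h
    rcases h with rfl | rfl | rfl | rfl
    · show pvRotLoop n "left" = _
      rw [ih "left" (by simp [pvCycle])]
      congr 1; simp [pvCycle]; omega
    · show pvRotLoop n "bottom" = _
      rw [ih "bottom" (by simp [pvCycle])]
      congr 1; simp [pvCycle]; omega
    · show pvRotLoop n "right" = _
      rw [ih "right" (by simp [pvCycle])]
      congr 1; simp [pvCycle]; omega
    · show pvRotLoop n "top" = _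
      rw [ih "top" (by simp [pvCycle])]
      congr 1; simp [pvCycle]
      have : (3 + (n + 1)) % 4 = n % 4 := by omega
      rw [this]

-- flipping never leaves or enters the cycle
lemma flip_fixed (f : String) (h : f ∉ pvCycle) :
    PySem.Dict.getD pvFLIP_V f f = f := by
  simp [pvCycle] at h
  obtain ⟨h1, _, h3, _⟩ := h
  simp [pvFLIP_V, PySem.Dict.getD_eq_get?_getD, beq_iff_eq, Ne.symm h1, Ne.symm h3, PySem.Dict.get?]

lemma flip_mem_iff (f : String) :
    (PySem.Dict.getD pvFLIP_V f f ∈ pvCycle) ↔ f ∈ pvCycle := by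
  by_cases h : f ∈ pvCycle
  · simp only [h, iff_true]
    simp [pvCycle] at h
    rcases h with rfl | rfl | rfl | rfl <;> decide
  · rw [flip_fixed f h]

-- B's closed-form index, rewritten through the modulus of rot alone
lemma mod_shift (idx : Nat) (rot : Int) :
    (PySem.Int.mod ((idx : Int) + rot) 4).toNat
      = (idx + (PySem.Int.mod rot 4).toNat) % 4 := by
  rw [PySem.Int.mod_eq_emod_of_pos (by omega), PySem.Int.mod_eq_emod_of_pos (by omega)]
  omega

-- ===== VERDICT (by name: the statement is the Claim_ definition above) =====
theorem apply_transformation_to_edge_tuple_spec : Claim_unchanged_apply_transformation_to_edge_tuple := by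
  intro et td _ _ hnd
  show apply_transformation_to_edge_tuple et td = apply_transformation_to_edge_tuple_alt et td
  unfold D_apply_transformation_to_edge_tuple at hnd
  simp only [apply_transformation_to_edge_tuple, apply_transformation_to_edge_tuple_alt]
  set rot := ((PySem.Dict.mk td).get? "rot_90").getD 0 with hrot
  have hr : et.2 ∈ pvCycle → 0 ≤ rot ∨ PySem.Int.mod rot 4 = 0 := by
    intro hm
    by_cases h0 : 0 ≤ rot
    · exact Or.inl h0
    · right
      by_contra hmm
      exact hnd ⟨by omega, hmm, by simpa [pvCycle] using hm⟩
  have key : ∀ f : String, f ∈ pvCycle → (0 ≤ rot ∨ PySem.Int.mod rot 4 = 0) →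
      pvRotLoop rot.toNat f
        = pvCycle.getD (PySem.Int.mod ((pvCycle.idxOf f : Int) + rot) 4).toNat "" := by
    intro f hc h
    rw [rotLoop_cycle _ _ hc, mod_shift]
    congr 1
    rw [PySem.Int.mod_eq_emod_of_pos (a := rot) (by omega)] at h ⊢
    rcases h with h | h <;> omega
  split_ifs with hf hc hc
  · have hm : et.2 ∈ pvCycle := (flip_mem_iff et.2).mp hc
    simp only [Prod.mk.injEq, true_and]
    exact ⟨key _ hc (hr hm), by simp [hf]⟩
  · simp only [Prod.mk.injEq, true_and]
    exact ⟨rotLoop_fixed _ _ hc, by simp [hf]⟩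
  · simp only [Prod.mk.injEq, true_and]
    exact ⟨key _ hc (hr hc), by simp [hf]⟩
  · simp only [Prod.mk.injEq, true_and]
    exact ⟨rotLoop_fixed _ _ hc, by simp [hf]⟩

theorem apply_transformation_to_edge_tuple_changed : Claim_changed_apply_transformation_to_edge_tuple := by
  unfold Claim_changed_apply_transformation_to_edge_tuple; decide

theorem apply_transformation_to_edge_tuple_tight : Claim_exact_apply_transformation_to_edge_tuple := by
  intro et td _ _ hd heq
  obtain ⟨hneg, hm, hface4⟩ := hd
  set rot := ((PySem.Dict.mk td).get? "rot_90").getD 0 with hrot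
  have htz : rot.toNat = 0 := by omega
  have hmem : et.2 ∈ pvCycle := by simp [pvCycle]; tauto
  have hm4 : (rot % 4).toNat = 1 ∨ (rot % 4).toNat = 2 ∨ (rot % 4).toNat = 3 := by
    rw [PySem.Int.mod_eq_emod_of_pos (a := rot) (by omega)] at hm
    omega
  simp only [apply_transformation_to_edge_tuple, apply_transformation_to_edge_tuple_alt] at heq
  rw [← hrot] at heq
  have heq2 := congrArg (fun p => p.2.1) heq
  simp only at heq2
  split_ifs at heq2 with hf hc hc
  · rw [htz] at heq2
    rw [mod_shift] at heq2
    simp only [pvRotLoop] at heq2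
    have hgl : PySem.Dict.getD pvFLIP_V et.2 et.2 = "top" ∨ PySem.Dict.getD pvFLIP_V et.2 et.2 = "left" ∨ PySem.Dict.getD pvFLIP_V et.2 et.2 = "bottom" ∨ PySem.Dict.getD pvFLIP_V et.2 et.2 = "right" := by
      simpa [pvCycle] using hc
    rcases hgl with h | h | h | h <;> rw [h] at heq2 <;>
      rcases hm4 with hm4 | hm4 | hm4 <;> simp [pvCycle, hm4] at heq2
  · exact hc ((flip_mem_iff et.2).mpr hmem)
  · rw [htz] at heq2
    rw [mod_shift] at heq2
    simp only [pvRotLoop] at heq2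
    rcases hface4 with h | h | h | h <;> rw [h] at heq2 <;>
      rcases hm4 with hm4 | hm4 | hm4 <;> simp [pvCycle, hm4] at heq2
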